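-- pv_equiv track=rewrite | github.com/jkyoon2/algorithm-study | 04-implementation/boj-10997.py | draw_star
-- ===== SOURCE A (Python) =====
-- def draw_star(n):
--     if n == 1:
--         return ['*']
--
--     stars = draw_star(n-1)
--     pattern = []
--
--     # 첫 번째 행
--     pattern.append('*' * (4 * (n-1) + 1))
--
--     # 두 번째 행
--     pattern.append('*' + ' '*(4 * (n-1)))
--
--     if n == 2:
--         pattern.append('* ' + stars[0] + '**')
--         pattern.append('* ' + stars[0] + ' *')
--         pattern.append('* ' + stars[0] + ' *')
--
--     else:
--         # 재귀적으로 형성된 패턴을 중간에 삽입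
--         for idx, star in enumerate(stars):
--             if idx == 0:
--                 pattern.append('* ' + star + '**')
--             else:
--                 pattern.append('* ' + star + ' *')
--
--     # 마지막에서 두 번째 행
--     pattern.append('*' + ' '*(4 * (n-1) - 1) + '*')
--
--     # 마지막 행
--     pattern.append('*' * (4 * (n-1) + 1))
--
--     return pattern
-- ===== SOURCE B (Python) =====
-- def draw_star(n):
--     # Closed-form row construction: each of the 4n-1 rows is built directly
--     # from O(1) repeated-string pieces (no recursion, no string re-copying).
--     if n == 1:
--         return ['*']
--     W = 4 * n - 3
--     mid = '* ' * (2 * n - 2) + '*'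
--     rows = ['*' * W, '*' + ' ' * (W - 1)]
--     for i in range(2, 2 * n - 1):
--         if i % 2 == 0:
--             rows.append('* ' * (i // 2) + '*' * (W - 2 * i + 2) + ' *' * (i // 2 - 1))
--         else:
--             rows.append('* ' * ((i + 1) // 2) + ' ' * (W - 2 * i) + ' *' * ((i - 1) // 2))
--     rows += [mid, mid]
--     for i in range(2 * n + 1, 4 * n - 3):
--         if i % 2 == 0:
--             r = (4 * n - 2 - i) // 2
--             rows.append('* ' * r + '*' * (W - 4 * r) + ' *' * r)
--         else:
--             k = (4 * n - 1 - i) // 2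
--             rows.append('* ' * k + ' ' * (2 * i - 4 * n - 1) + ' *' * k)
--     rows += ['*' + ' ' * (W - 2) + '*', '*' * W]
--     return rows
-- ===== Notes on version B (the rewrite author's own statement) =====
-- stated objective: faster
-- what changed: A builds the picture recursively, re-copying and re-wrapping every row of the (n-1)-pattern at each of the n levels; B emits each of the 4n-1 rows directly from a closed-form O(1)-piece formula ('* '*a + '*'*b/' '*b + ' *'*c per row), with no recursion and no re-copying.
-- outside the precondition, e.g. on draw_star(0): A raises RecursionError, B returns ['', '*', '*', '*', '**', '']
import Mathlib
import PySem

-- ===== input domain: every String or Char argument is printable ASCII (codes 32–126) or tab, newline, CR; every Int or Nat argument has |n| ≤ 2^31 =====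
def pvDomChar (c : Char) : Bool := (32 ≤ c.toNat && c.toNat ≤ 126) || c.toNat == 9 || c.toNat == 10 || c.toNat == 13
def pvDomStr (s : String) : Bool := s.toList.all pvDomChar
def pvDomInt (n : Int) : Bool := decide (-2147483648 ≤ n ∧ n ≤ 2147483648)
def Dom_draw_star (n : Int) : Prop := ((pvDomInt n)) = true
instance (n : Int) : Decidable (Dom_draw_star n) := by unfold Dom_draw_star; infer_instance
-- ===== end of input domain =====

-- B replaces A's O(n^3) recursive re-copying of every inner row by a direct
-- closed-form construction of each of the 4n-1 rows from repeated pieces.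

-- ===== PORT A =====
-- Literal transliteration of A's recursion, on n.toNat so the recursion is
-- structural (A recurses n -> n-1 with base n == 1; for n <= 0 Python never
-- returns — those inputs are excluded by Pre_ below, drawA 0 is a dead arm).
-- 'stars[0]' is written stars.headD "" — stars is never empty in that branch.
def drawA : Nat → List String
  | 0 => []
  | 1 => [String.ofList ['*']]
  | m + 2 =>
    let n := m + 2
    let stars := drawA (m + 1)
    let p1 := String.ofList (List.replicate (4*(n-1)+1) '*')
    let p2 := String.ofList ('*' :: List.replicate (4*(n-1)) ' ')
    let midRows :=
      if n = 2 then
        [String.ofList ('*' :: ' ' :: (stars.headD "").toList ++ ['*','*']),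
         String.ofList ('*' :: ' ' :: (stars.headD "").toList ++ [' ','*']),
         String.ofList ('*' :: ' ' :: (stars.headD "").toList ++ [' ','*'])]
      else
        (PySem.List.enumerate stars).map (fun p =>
          if p.1 = 0 then String.ofList ('*' :: ' ' :: p.2.toList ++ ['*','*'])
          else String.ofList ('*' :: ' ' :: p.2.toList ++ [' ','*']))
    let p3 := String.ofList ('*' :: List.replicate (4*(n-1)-1) ' ' ++ ['*'])
    let p4 := String.ofList (List.replicate (4*(n-1)+1) '*')
    [p1, p2] ++ midRows ++ [p3, p4]

def draw_star (n : Int) : List String := drawA n.toNat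

-- ===== PORT B =====
-- rows.append body of Source B's first loop ('* '*k etc. is pyRepeat)
def pvRowTop (n i : Int) : List Char :=
  if PySem.Int.mod i 2 = 0 then
    PySem.List.pyRepeat ['*', ' '] (PySem.Int.floordiv i 2) ++
    PySem.List.pyRepeat ['*'] (4*n - 3 - 2*i + 2) ++
    PySem.List.pyRepeat [' ', '*'] (PySem.Int.floordiv i 2 - 1)
  else
    PySem.List.pyRepeat ['*', ' '] (PySem.Int.floordiv (i+1) 2) ++
    PySem.List.pyRepeat [' '] (4*n - 3 - 2*i) ++
    PySem.List.pyRepeat [' ', '*'] (PySem.Int.floordiv (i-1) 2)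

-- rows.append body of Source B's second loop
def pvRowBot (n i : Int) : List Char :=
  if PySem.Int.mod i 2 = 0 then
    PySem.List.pyRepeat ['*', ' '] (PySem.Int.floordiv (4*n-2-i) 2) ++
    PySem.List.pyRepeat ['*'] (4*n - 3 - 4 * PySem.Int.floordiv (4*n-2-i) 2) ++
    PySem.List.pyRepeat [' ', '*'] (PySem.Int.floordiv (4*n-2-i) 2)
  else
    PySem.List.pyRepeat ['*', ' '] (PySem.Int.floordiv (4*n-1-i) 2) ++
    PySem.List.pyRepeat [' '] (2*i - 4*n - 1) ++
    PySem.List.pyRepeat [' ', '*'] (PySem.Int.floordiv (4*n-1-i) 2)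

def pvMid (n : Int) : List Char := PySem.List.pyRepeat ['*', ' '] (2*n-2) ++ ['*']

def draw_star_alt (n : Int) : List String :=
  if n = 1 then [String.ofList ['*']] else
    [String.ofList (PySem.List.pyRepeat ['*'] (4*n-3)),
     String.ofList ('*' :: PySem.List.pyRepeat [' '] (4*n-3-1))]
    ++ (PySem.List.pyRange 2 (2*n-1) 1).map (fun i => String.ofList (pvRowTop n i))
    ++ [String.ofList (pvMid n), String.ofList (pvMid n)]
    ++ (PySem.List.pyRange (2*n+1) (4*n-3) 1).map (fun i => String.ofList (pvRowBot n i))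
    ++ [String.ofList ('*' :: (PySem.List.pyRepeat [' '] (4*n-3-2) ++ ['*'])),
        String.ofList (PySem.List.pyRepeat ['*'] (4*n-3))]

-- ===== PRECONDITION & SPEC =====
-- Pre_ excludes exactly n <= 0, where Python A recurses forever (RecursionError).
def Pre_draw_star (n : Int) : Prop := 1 ≤ n
instance (n : Int) : Decidable (Pre_draw_star n) := by unfold Pre_draw_star; infer_instance
def pvWitness_draw_star : Int := (3)
def Spec_draw_star (n : Int) (out : List String) : Prop := out = draw_star_alt n
instance (n : Int) (out : List String) : Decidable (Spec_draw_star n out) := by unfold Spec_draw_star; infer_instance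

-- ===== CLAIM (what is proved, stated in full; the proofs are below) =====
def Claim_equal_draw_star : Prop := ∀ (n : Int), Dom_draw_star n → Pre_draw_star n → Spec_draw_star n (draw_star n)

-- ===== LEMMAS AND PROOFS =====
def pvF0 (s : String) : String := String.ofList ('*' :: ' ' :: s.toList ++ ['*','*'])
def pvG (s : String) : String := String.ofList ('*' :: ' ' :: s.toList ++ [' ','*'])

theorem pvRep_add {α : Type} (xs : List α) (a b : Int) (ha : 0 ≤ a) (hb : 0 ≤ b) :
    PySem.List.pyRepeat xs (a+b) = PySem.List.pyRepeat xs a ++ PySem.List.pyRepeat xs b := by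
  simp only [PySem.List.pyRepeat]
  have h : (a+b).toNat = a.toNat + b.toNat := by omega
  rw [h, List.replicate_add, List.flatten_append]

theorem pvRep_one {α : Type} (xs : List α) : PySem.List.pyRepeat xs 1 = xs := by
  simp [PySem.List.pyRepeat]

theorem pvRep_succ_l {α : Type} (xs : List α) (k : Int) (hk : 0 ≤ k) :
    PySem.List.pyRepeat xs (k+1) = xs ++ PySem.List.pyRepeat xs k := by
  rw [show k+1 = 1+k by ring, pvRep_add xs 1 k (by omega) hk, pvRep_one]

theorem pvRep_succ_r {α : Type} (xs : List α) (k : Int) (hk : 0 ≤ k) :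
    PySem.List.pyRepeat xs (k+1) = PySem.List.pyRepeat xs k ++ xs := by
  rw [pvRep_add xs k 1 hk (by omega), pvRep_one]

theorem pvMod2_even (t : Int) : PySem.Int.mod (2*t) 2 = 0 := by
  simp [PySem.Int.mod, Int.fmod_eq_emod]

theorem pvMod2_odd (t : Int) : PySem.Int.mod (2*t+1) 2 = 1 := by
  simp [PySem.Int.mod, Int.fmod_eq_emod]

theorem pvFdiv2 (t : Int) : PySem.Int.floordiv (2*t) 2 = t := by
  simp [PySem.Int.floordiv, Int.fdiv_eq_ediv]

-- the n = 1 picture wrapped once: first middle row of the wrap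
theorem pvRowTop_two (n : Int) (h : 3 ≤ n) :
    pvRowTop n 2 = '*' :: ' ' :: (PySem.List.pyRepeat ['*'] (4*(n-1)-3) ++ ['*','*']) := by
  unfold pvRowTop
  rw [if_pos (by decide : PySem.Int.mod 2 2 = 0), (by decide : PySem.Int.floordiv 2 2 = 1)]
  rw [show (4*n - 3 - 2*2 + 2 : Int) = (4*(n-1)-3) + 2 by ring,
      pvRep_add ['*'] (4*(n-1)-3) 2 (by omega) (by omega),
      (by decide : PySem.List.pyRepeat ['*'] 2 = ['*','*']),
      (by decide : PySem.List.pyRepeat [' ','*'] (1-1 : Int) = []),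
      pvRep_one]
  simp

theorem pvRowTop_three (n : Int) (h : 3 ≤ n) :
    pvRowTop n 3 = '*' :: ' ' :: (('*' :: PySem.List.pyRepeat [' '] (4*(n-1)-3-1)) ++ [' ','*']) := by
  unfold pvRowTop
  rw [if_neg (by decide : ¬ (PySem.Int.mod 3 2 = 0)),
      (by decide : PySem.Int.floordiv (3+1) 2 = 2),
      (by decide : PySem.Int.floordiv (3-1) 2 = 1),
      (by decide : PySem.List.pyRepeat ['*',' '] (2:Int) = ['*',' ','*',' ']),
      pvRep_one,
      show (4*(n-1)-3-1 : Int) = 1 + (4*n - 3 - 2*3) by ring,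
      pvRep_add [' '] 1 (4*n - 3 - 2*3) (by omega) (by omega), pvRep_one]
  simp

theorem pvRowTop_step (n i : Int) (_h3 : 3 ≤ n) (h2 : 2 ≤ i) (h4 : i ≤ 2*n-4) :
    pvRowTop n (i+2) = '*' :: ' ' :: (pvRowTop (n-1) i ++ [' ','*']) := by
  unfold pvRowTop
  rcases Int.even_or_odd' i with ⟨t, rfl | rfl⟩
  · -- i = 2t, 1 ≤ t ≤ n-2
    rw [show (2*t+2 : Int) = 2*(t+1) by ring,
        if_pos (pvMod2_even (t+1)), if_pos (pvMod2_even t),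
        pvFdiv2 (t+1), pvFdiv2 t,
        show (4*n - 3 - 2*(2*(t+1)) + 2 : Int) = 4*(n-1) - 3 - 2*(2*t) + 2 by ring,
        show (t+1-1 : Int) = (t-1)+1 by ring,
        pvRep_succ_l ['*',' '] t (by omega),
        pvRep_succ_r [' ','*'] (t-1) (by omega)]
    simp
  · -- i = 2t+1, 1 ≤ t
    rw [show (2*t+1+2 : Int) = 2*(t+1)+1 by ring,
        if_neg (by rw [pvMod2_odd (t+1)]; omega),
        if_neg (by rw [pvMod2_odd t]; omega),
        show (2*(t+1)+1+1 : Int) = 2*(t+2) by ring,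
        show (2*(t+1)+1-1 : Int) = 2*(t+1) by ring,
        show (2*t+1+1 : Int) = 2*(t+1) by ring,
        show (2*t+1-1 : Int) = 2*t by ring,
        pvFdiv2 (t+2), pvFdiv2 (t+1), pvFdiv2 t,
        show (4*n - 3 - 2*(2*(t+1)+1) : Int) = 4*(n-1) - 3 - 2*(2*t+1) by ring,
        show (t+2 : Int) = (t+1)+1 by ring,
        pvRep_succ_l ['*',' '] (t+1) (by omega),
        pvRep_succ_r [' ','*'] t (by omega)]
    simp

theorem pvMid_step (n : Int) (h : 3 ≤ n) :
    pvMid n = '*' :: ' ' :: (pvMid (n-1) ++ [' ','*']) := by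
  unfold pvMid
  rw [show (2*n-2 : Int) = 1 + (2*(n-1)-2) + 1 by ring,
      pvRep_add ['*',' '] (1 + (2*(n-1)-2)) 1 (by omega) (by omega),
      pvRep_add ['*',' '] 1 (2*(n-1)-2) (by omega) (by omega),
      pvRep_one]
  simp

theorem pvRowBot_step (n i : Int) (_h3 : 3 ≤ n) (hl : 2*n-1 ≤ i) (hu : i ≤ 4*n-8) :
    pvRowBot n (i+2) = '*' :: ' ' :: (pvRowBot (n-1) i ++ [' ','*']) := by
  unfold pvRowBot
  rcases Int.even_or_odd' i with ⟨t, rfl | rfl⟩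
  · -- i = 2t, n ≤ t ≤ 2n-4
    rw [show (2*t+2 : Int) = 2*(t+1) by ring,
        if_pos (pvMod2_even (t+1)), if_pos (pvMod2_even t),
        show (4*n-2-2*(t+1) : Int) = 2*(2*n-2-t) by ring,
        show (4*(n-1)-2-2*t : Int) = 2*(2*n-3-t) by ring,
        pvFdiv2 (2*n-2-t), pvFdiv2 (2*n-3-t),
        show (4*n - 3 - 4*(2*n-2-t) : Int) = 4*(n-1) - 3 - 4*(2*n-3-t) by ring,
        show (2*n-2-t : Int) = (2*n-3-t)+1 by ring,
        pvRep_succ_l ['*',' '] (2*n-3-t) (by omega),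
        pvRep_succ_r [' ','*'] (2*n-3-t) (by omega)]
    simp
  · -- i = 2t+1, n-1 ≤ t ≤ 2n-5
    rw [show (2*t+1+2 : Int) = 2*(t+1)+1 by ring,
        if_neg (by rw [pvMod2_odd (t+1)]; omega),
        if_neg (by rw [pvMod2_odd t]; omega),
        show (4*n-1-(2*(t+1)+1) : Int) = 2*(2*n-2-t) by ring,
        show (4*(n-1)-1-(2*t+1) : Int) = 2*(2*n-3-t) by ring,
        pvFdiv2 (2*n-2-t), pvFdiv2 (2*n-3-t),
        show (2*(2*(t+1)+1) - 4*n - 1 : Int) = 2*(2*t+1) - 4*(n-1) - 1 by ring,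
        show (2*n-2-t : Int) = (2*n-3-t)+1 by ring,
        pvRep_succ_l ['*',' '] (2*n-3-t) (by omega),
        pvRep_succ_r [' ','*'] (2*n-3-t) (by omega)]
    simp

theorem pvRowBot_p3 (n : Int) (h : 3 ≤ n) :
    pvRowBot n (4*n-5) = '*' :: ' ' :: (('*' :: (PySem.List.pyRepeat [' '] (4*(n-1)-3-2) ++ ['*'])) ++ [' ','*']) := by
  unfold pvRowBot
  rw [show (4*n-5 : Int) = 2*(2*n-3)+1 by ring,
      if_neg (by rw [pvMod2_odd (2*n-3)]; omega),
      show (4*n-1-(2*(2*n-3)+1) : Int) = 2*2 by ring,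
      pvFdiv2 2,
      (by decide : PySem.List.pyRepeat ['*',' '] (2:Int) = ['*',' ','*',' ']),
      (by decide : PySem.List.pyRepeat [' ','*'] (2:Int) = [' ','*',' ','*']),
      show (4*(n-1)-3-2 : Int) = 1 + (2*(2*(2*n-3)+1) - 4*n - 1) + 1 by ring,
      pvRep_add [' '] (1 + (2*(2*(2*n-3)+1) - 4*n - 1)) 1 (by omega) (by omega),
      pvRep_add [' '] 1 (2*(2*(2*n-3)+1) - 4*n - 1) (by omega) (by omega),
      pvRep_one]
  simp

theorem pvRowBot_p4 (n : Int) (_h : 3 ≤ n) :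
    pvRowBot n (4*n-4) = '*' :: ' ' :: (PySem.List.pyRepeat ['*'] (4*(n-1)-3) ++ [' ','*']) := by
  unfold pvRowBot
  rw [show (4*n-4 : Int) = 2*(2*n-2) by ring,
      if_pos (pvMod2_even (2*n-2)),
      show (4*n-2-2*(2*n-2) : Int) = 2*1 by ring,
      pvFdiv2 1,
      show (4*n - 3 - 4*1 : Int) = 4*(n-1)-3 by ring,
      pvRep_one, pvRep_one]
  simp

theorem pvEnumMap (xs : List String) : ∀ (s : Int), 1 ≤ s →
    (PySem.List.enumerate xs s).map (fun p =>
        if p.1 = 0 then String.ofList ('*' :: ' ' :: (p.2.toList ++ ['*','*']))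
        else String.ofList ('*' :: ' ' :: (p.2.toList ++ [' ','*']))) = xs.map pvG := by
  induction xs with
  | nil => intro s _; simp [PySem.List.enumerate_nil]
  | cons x t ih =>
    intro s hs
    rw [PySem.List.enumerate_cons, List.map_cons, List.map_cons, if_neg (by omega), ih (s+1) (by omega)]
    rfl

theorem pvStep (k : Nat) (ih : drawA (k+1+1) = draw_star_alt ((k:Int)+2)) :
    drawA (k+1+2) = draw_star_alt ((k:Int)+3) := by
  rw [drawA]
  rw [if_neg (by omega : ¬ (k+1+2 = 2))]
  rw [show drawA (k+1+1) = draw_star_alt ((k:Int)+2) from ih]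
  simp only [draw_star_alt]
  rw [if_neg (by omega : ¬ ((k:Int)+2 = 1)), if_neg (by omega : ¬ ((k:Int)+3 = 1))]
  simp only [List.cons_append, List.nil_append]
  rw [PySem.List.enumerate_cons]
  simp only [List.map_cons]
  rw [show (0:Int)+1 = 1 from by norm_num]
  rw [pvEnumMap _ 1 (by omega)]
  simp only [if_true, List.map_cons, List.map_append, String.toList_ofList]
  -- split the target's top range as 2 :: 3 :: rest
  rw [PySem.List.pyRange_one_cons (show (2:Int) < 2*((k:Int)+3)-1 by omega),
      PySem.List.pyRange_one_cons (show (2:Int)+1 < 2*((k:Int)+3)-1 by omega)]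
  -- split the target's bottom range as init ++ [4n-5, 4n-4]
  have hsplit : PySem.List.pyRange (2*((k:Int)+3)+1) (4*((k:Int)+3)-3) 1
      = PySem.List.pyRange (2*((k:Int)+3)+1) (4*((k:Int)+3)-5) 1 ++ [4*((k:Int)+3)-5, 4*((k:Int)+3)-4] := by
    rw [PySem.List.pyRange_one_append (2*((k:Int)+3)+1) (4*((k:Int)+3)-5) (4*((k:Int)+3)-3) (by omega) (by omega)]
    congr 1
    rw [PySem.List.pyRange_one_cons (by omega), PySem.List.pyRange_one_cons (by omega),
        PySem.List.pyRange_one_eq_nil (by omega)]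
    have h : (4*((k:Int)+3)-5)+1 = 4*((k:Int)+3)-4 := by ring
    rw [h]
  rw [hsplit]
  simp only [List.map_cons, List.map_append, List.map_nil]
  have hm1 : ((k:Int)+3-1) = (k:Int)+2 := by ring
  have e1 : String.ofList (PySem.List.pyRepeat ['*'] (4*((k:Int)+3)-3))
      = String.ofList (List.replicate (4*(k+1+2-1)+1) '*') := by
    rw [PySem.List.pyRepeat_singleton, show (4*((k:Int)+3)-3).toNat = 4*(k+1+2-1)+1 from by omega]
  have e2 : String.ofList ('*' :: PySem.List.pyRepeat [' '] (4*((k:Int)+3)-3-1))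
      = String.ofList ('*' :: List.replicate (4*(k+1+2-1)) ' ') := by
    rw [PySem.List.pyRepeat_singleton, show (4*((k:Int)+3)-3-1).toNat = 4*(k+1+2-1) from by omega]
  have e3 : String.ofList (pvRowTop ((k:Int)+3) 2)
      = String.ofList ('*' :: ' ' :: (PySem.List.pyRepeat ['*'] (4*((k:Int)+2)-3) ++ ['*','*'])) := by
    rw [pvRowTop_two ((k:Int)+3) (by omega), hm1]
  have e4 : String.ofList (pvRowTop ((k:Int)+3) (2+1))
      = pvG (String.ofList ('*' :: PySem.List.pyRepeat [' '] (4*((k:Int)+2)-3-1))) := by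
    rw [show ((2:Int)+1) = 3 from by norm_num, pvRowTop_three ((k:Int)+3) (by omega), hm1]
    simp [pvG]
  have e5 : List.map (fun i => String.ofList (pvRowTop ((k:Int)+3) i)) (PySem.List.pyRange (2+1+1) (2*((k:Int)+3)-1) 1)
      = List.map pvG (List.map (fun i => String.ofList (pvRowTop ((k:Int)+2) i)) (PySem.List.pyRange 2 (2*((k:Int)+2)-1) 1)) := by
    rw [List.map_map, PySem.List.pyRange_one, PySem.List.pyRange_one, List.map_map, List.map_map]
    have h1 : ((2*((k:Int)+3)-1) - (2+1+1)).toNat = 2*k+1 := by omega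
    have h2 : ((2*((k:Int)+2)-1) - 2).toNat = 2*k+1 := by omega
    rw [h1, h2]
    apply List.map_congr_left
    intro j hj
    rw [List.mem_range] at hj
    simp only [Function.comp]
    rw [show ((2:Int)+1+1+(j:Int)) = (2+(j:Int))+2 by ring,
        pvRowTop_step ((k:Int)+3) (2+(j:Int)) (by omega) (by omega) (by omega), hm1]
    simp [pvG]
  have e6 : String.ofList (pvMid ((k:Int)+3)) = pvG (String.ofList (pvMid ((k:Int)+2))) := by
    rw [pvMid_step ((k:Int)+3) (by omega), hm1]
    simp [pvG]
  have e7 : List.map (fun i => String.ofList (pvRowBot ((k:Int)+3) i)) (PySem.List.pyRange (2*((k:Int)+3)+1) (4*((k:Int)+3)-5) 1)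
      = List.map pvG (List.map (fun i => String.ofList (pvRowBot ((k:Int)+2) i)) (PySem.List.pyRange (2*((k:Int)+2)+1) (4*((k:Int)+2)-3) 1)) := by
    rw [List.map_map, PySem.List.pyRange_one, PySem.List.pyRange_one, List.map_map, List.map_map]
    have h1 : ((4*((k:Int)+3)-5) - (2*((k:Int)+3)+1)).toNat = 2*k := by omega
    have h2 : ((4*((k:Int)+2)-3) - (2*((k:Int)+2)+1)).toNat = 2*k := by omega
    rw [h1, h2]
    apply List.map_congr_left
    intro j hj
    rw [List.mem_range] at hj
    simp only [Function.comp]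
    rw [show (2*((k:Int)+3)+1+(j:Int)) = (2*((k:Int)+2)+1+(j:Int))+2 by ring,
        pvRowBot_step ((k:Int)+3) (2*((k:Int)+2)+1+(j:Int)) (by omega) (by omega) (by omega), hm1]
    simp [pvG]
  have e8 : String.ofList (pvRowBot ((k:Int)+3) (4*((k:Int)+3)-5))
      = pvG (String.ofList ('*' :: (PySem.List.pyRepeat [' '] (4*((k:Int)+2)-3-2) ++ ['*']))) := by
    rw [pvRowBot_p3 ((k:Int)+3) (by omega), hm1]
    simp [pvG]
  have e9 : String.ofList (pvRowBot ((k:Int)+3) (4*((k:Int)+3)-4))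
      = pvG (String.ofList (PySem.List.pyRepeat ['*'] (4*((k:Int)+2)-3))) := by
    rw [pvRowBot_p4 ((k:Int)+3) (by omega), hm1]
    simp [pvG]
  have e10 : String.ofList ('*' :: (PySem.List.pyRepeat [' '] (4*((k:Int)+3)-3-2) ++ ['*']))
      = String.ofList ('*' :: (List.replicate (4*(k+1+2-1)-1) ' ' ++ ['*'])) := by
    rw [PySem.List.pyRepeat_singleton, show (4*((k:Int)+3)-3-2).toNat = 4*(k+1+2-1)-1 from by omega]
  rw [e1, e2, e3, e4, e5, e6, e7, e8, e9, e10]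
  simp [List.append_assoc]

theorem pvMain : ∀ (m : Nat), drawA (m+1) = draw_star_alt ((m:Int)+1) := by
  intro m
  induction m with
  | zero => decide
  | succ k ih =>
    cases k with
    | zero => decide
    | succ j =>
      have ih' : drawA (j+1+1) = draw_star_alt ((j:Int)+2) := by
        rw [ih, show (((j+1 : Nat)):Int)+1 = (j:Int)+2 from by push_cast; ring]
      have h := pvStep j ih'
      rw [show (((j+1+1 : Nat)):Int)+1 = (j:Int)+3 from by push_cast; ring]
      exact h

-- ===== VERDICT (by name: the statement is the Claim_ definition above) =====
theorem draw_star_spec : Claim_equal_draw_star := by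
  intro n _ hpre
  unfold Spec_draw_star draw_star
  unfold Pre_draw_star at hpre
  obtain ⟨m, hm⟩ : ∃ m : Nat, n.toNat = m + 1 := ⟨n.toNat - 1, by omega⟩
  rw [hm, pvMain m, show ((m:Int)+1) = n by omega]
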